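-- pv_equiv track=rewrite | github.com/0x00-pl/cpp-refback | parser_unit/base.py | token_str
-- ===== SOURCE A (Python) =====
-- def token_char(text):
--  if not text.startswith("'"): return None
--  try:
--   if text[1]=='\\':
--    if text[3]=="'": return (text[:4],text[4:])
--    else: return None
--   else:
--    if text[2]=="'": return (text[:3],text[3:])
--    else: return None
--  except IndexError:
--   return None
--
-- def token_str(text):
--  if not text.startswith('"'): return token_char(text)
--  cut=1
--  while cut<=len(text):
--   if text.startswith('"',cut):
--    cut+=1
--    return (text[:cut],text[cut:])
--   elif text.startswith('\\',cut):
--    cut+=2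
--   else:
--    cut+=1
--  return None
-- ===== SOURCE B (Python) =====
-- def token_char(text):
--     m = len(text)
--     if text.startswith("'"):
--         if m >= 4 and text[1] == '\\' and text[3] == "'":
--             return (text[:4], text[4:])
--         if m >= 3 and text[1] != '\\' and text[2] == "'":
--             return (text[:3], text[3:])
--     return None
--
-- def token_str(text):
--     if not text.startswith('"'):
--         return token_char(text)
--     # jump from quote to quote; a quote closes the literal iff the number of
--     # backslashes immediately before it is even
--     q = 0
--     while True:
--         q = text.find('"', q + 1)
--         if q == -1:
--             return None
--         b = q
--         while text[b - 1] == '\\':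
--             b -= 1
--         if (q - b) % 2 == 0:
--             return (text[:q + 1], text[q + 1:])
-- ===== Notes on version B (the rewrite author's own statement) =====
-- stated objective: alternative
-- what changed: token_str's char-by-char escape-skipping scan is replaced by jumping between '"' occurrences with str.find and deciding each candidate by the parity of the backslash run immediately before it; token_char's try/except indexing is replaced by explicit length guards.
import Mathlib
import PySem

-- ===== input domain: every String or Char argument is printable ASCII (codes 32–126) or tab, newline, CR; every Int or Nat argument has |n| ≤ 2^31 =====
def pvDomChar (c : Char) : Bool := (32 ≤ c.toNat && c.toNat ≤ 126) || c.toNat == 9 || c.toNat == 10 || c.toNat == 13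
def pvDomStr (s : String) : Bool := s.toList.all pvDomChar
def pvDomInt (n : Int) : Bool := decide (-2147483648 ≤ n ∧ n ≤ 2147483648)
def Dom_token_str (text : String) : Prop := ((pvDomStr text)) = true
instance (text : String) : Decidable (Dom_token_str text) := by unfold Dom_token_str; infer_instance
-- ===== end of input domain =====

-- B replaces A's char-by-char escape-skipping scan by jumping between '"' occurrences with
-- str.find and deciding each by the parity of the backslash run before it (objective: alternative).

-- ===== PORT A =====
-- token_char: literal port of A's helper; the try/except IndexError is ported by matching
-- pyGet? (none = IndexError → return None), branches in A's order.
def token_char (text : String) : Option (String × String) :=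
  let cs := text.toList
  if PySem.Chars.startswith cs ['\''] then
    match PySem.List.pyGet? cs 1 with
    | none => none
    | some c1 =>
      if c1 = '\\' then
        match PySem.List.pyGet? cs 3 with
        | none => none
        | some c3 =>
          if c3 = '\'' then
            some (String.ofList (PySem.List.slice cs none (some 4)), String.ofList (PySem.List.slice cs (some 4) none))
          else none
      else
        match PySem.List.pyGet? cs 2 with
        | none => none
        | some c2 =>
          if c2 = '\'' then
            some (String.ofList (PySem.List.slice cs none (some 3)), String.ofList (PySem.List.slice cs (some 3) none))
          else none
  else none

-- A's while loop; text.startswith(c, cut) with 0 ≤ cut ≤ len(text) is exactly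
-- startswith on the suffix text[cut:]. Returns the final cut (position after the
-- closing quote); token_str builds the pair (text[:cut], text[cut:]) from it.
def tokenStrLoopA (cs : List Char) (cut : Nat) : Option Nat :=
  if h : cut ≤ cs.length then
    if PySem.Chars.startswith (cs.drop cut) ['"'] then some (cut + 1)
    else if PySem.Chars.startswith (cs.drop cut) ['\\'] then tokenStrLoopA cs (cut + 2)
    else tokenStrLoopA cs (cut + 1)
  else none
termination_by cs.length + 1 - cut
decreasing_by all_goals omega

def token_str (text : String) : Option (String × String) :=
  let cs := text.toList
  if PySem.Chars.startswith cs ['"'] then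
    match tokenStrLoopA cs 1 with
    | some cut => some (String.ofList (PySem.List.slice cs none (some (cut : Int))), String.ofList (PySem.List.slice cs (some (cut : Int)) none))
    | none => none
  else token_char text

-- ===== PORT B =====
-- token_char of Source B: guard by length and index directly, no exception handling.
def token_char_alt (text : String) : Option (String × String) :=
  let cs := text.toList
  let m := cs.length
  if PySem.Chars.startswith cs ['\''] then
    if 4 ≤ m ∧ PySem.List.pyGet? cs 1 = some '\\' ∧ PySem.List.pyGet? cs 3 = some '\'' then
      some (String.ofList (PySem.List.slice cs none (some 4)), String.ofList (PySem.List.slice cs (some 4) none))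
    else if 3 ≤ m ∧ PySem.List.pyGet? cs 1 ≠ some '\\' ∧ PySem.List.pyGet? cs 2 = some '\'' then
      some (String.ofList (PySem.List.slice cs none (some 3)), String.ofList (PySem.List.slice cs (some 3) none))
    else none
  else none

-- Source B's inner `while text[b-1] == '\\': b -= 1`. The `0 < b` conjunct only makes the
-- recursion total; it is unreachable from token_str_alt (there text[0] = '"' stops the loop at b = 1).
def bLoopB (cs : List Char) (b : Nat) : Nat :=
  if 0 < b ∧ PySem.List.pyGet? cs ((b : Int) - 1) = some '\\' then bLoopB cs (b - 1) else b
termination_by b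

-- Source B's outer quote-jumping loop; fuel (cs.length + 1 at the call site) only makes the
-- recursion total — q strictly increases and stays below cs.length, so fuel never runs out.
def strLoopB (cs : List Char) : Nat → Nat → Option Nat
  | 0, _ => none
  | fuel + 1, q =>
    let f := PySem.Chars.findFrom cs ['"'] ((q : Int) + 1) none
    if f = -1 then none
    else
      let q' := f.toNat
      let b := bLoopB cs q'
      if (q' - b) % 2 = 0 then some (q' + 1) else strLoopB cs fuel q'

def token_str_alt (text : String) : Option (String × String) :=
  let cs := text.toList
  if PySem.Chars.startswith cs ['"'] then
    match strLoopB cs (cs.length + 1) 0 with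
    | some cut => some (String.ofList (PySem.List.slice cs none (some (cut : Int))), String.ofList (PySem.List.slice cs (some (cut : Int)) none))
    | none => none
  else token_char_alt text

-- ===== PRECONDITION & SPEC =====
def Spec_token_str (text : String) (out : Option (String × String)) : Prop := out = token_str_alt text
instance (text : String) (out : Option (String × String)) : Decidable (Spec_token_str text out) := by unfold Spec_token_str; infer_instance

-- ===== CLAIM (what is proved, stated in full; the proofs are below) =====
def Claim_equal_token_str : Prop := ∀ (text : String), Dom_token_str text → Spec_token_str text (token_str text)

-- ===== LEMMAS AND PROOFS =====

lemma sw_single {cs : List Char} {c : Char} : PySem.Chars.startswith cs [c] = true ↔ cs[0]? = some c := by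
  rw [PySem.Chars.startswith_iff]
  cases cs with
  | nil => simp
  | cons a t => simp [List.cons_prefix_cons, eq_comm]

lemma sw_single_at {cs : List Char} {c : Char} {k : Nat} :
    PySem.Chars.startswith (cs.drop k) [c] = true ↔ cs[k]? = some c := by
  rw [sw_single]; simp

lemma loopA_step {cs : List Char} {cut : Nat} {c : Char} (hc : cs[cut]? = some c) :
    tokenStrLoopA cs cut =
      if c = '"' then some (cut + 1)
      else if c = '\\' then tokenStrLoopA cs (cut + 2)
      else tokenStrLoopA cs (cut + 1) := by
  have hlt : cut < cs.length := (List.getElem?_eq_some_iff.mp hc).1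
  rw [tokenStrLoopA, dif_pos (by omega)]
  by_cases h1 : c = '"'
  · rw [if_pos (sw_single_at.mpr (h1 ▸ hc)), if_pos h1]
  · rw [if_neg (by simp only [sw_single_at, hc, Option.some.injEq]; exact h1), if_neg h1]
    by_cases h2 : c = '\\'
    · rw [if_pos (sw_single_at.mpr (h2 ▸ hc)), if_pos h2]
    · rw [if_neg (by simp only [sw_single_at, hc, Option.some.injEq]; exact h2), if_neg h2]

lemma loopA_stop {cs : List Char} {cut : Nat} (h : cs.length ≤ cut) : tokenStrLoopA cs cut = none := by
  rw [tokenStrLoopA]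
  by_cases he : cut ≤ cs.length
  · have hnil : cs.drop cut = [] := List.drop_eq_nil_of_le h
    have hsw : ∀ c : Char, ¬ (PySem.Chars.startswith (cs.drop cut) [c] = true) := by
      intro c hc; rw [hnil, PySem.Chars.startswith_iff] at hc; simp at hc
    rw [dif_pos he, if_neg (hsw _), if_neg (hsw _)]
    exact loopA_stop (cut := cut + 1) (by omega)
  · rw [dif_neg he]
termination_by cs.length + 1 - cut

lemma loopA_noQuote {cs : List Char} {cut : Nat} (h : ∀ i, cut ≤ i → cs[i]? ≠ some '"') :
    tokenStrLoopA cs cut = none := by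
  by_cases hlt : cut < cs.length
  · have hc : cs[cut]? = some cs[cut] := List.getElem?_eq_getElem hlt
    rw [loopA_step hc, if_neg (fun he => h cut le_rfl (by rw [← he]; exact hc))]
    by_cases h2 : cs[cut] = '\\'
    · rw [if_pos h2]; exact loopA_noQuote (fun i hi => h i (by omega))
    · rw [if_neg h2]; exact loopA_noQuote (fun i hi => h i (by omega))
  · exact loopA_stop (by omega)
termination_by cs.length + 1 - cut

-- A's scan passes unchanged over a quote-free stretch not ending in a backslash.
lemma loopA_skip {cs : List Char} : ∀ (n p r : Nat), r - p ≤ n → p ≤ r → r < cs.length →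
    (∀ i, p ≤ i → i < r → cs[i]? ≠ some '"') → (p < r → cs[r - 1]? ≠ some '\\') →
    tokenStrLoopA cs p = tokenStrLoopA cs r := by
  intro n
  induction n with
  | zero =>
    intro p r h1 h2 _ _ _
    have hpr : p = r := by omega
    rw [hpr]
  | succ n ih =>
    intro p r h1 h2 hr hq hb
    by_cases hpr : p = r
    · rw [hpr]
    have hplt : p < r := by omega
    have hpl : p < cs.length := by omega
    have hc : cs[p]? = some cs[p] := List.getElem?_eq_getElem hpl
    rw [loopA_step hc, if_neg (fun he => hq p le_rfl hplt (by rw [← he]; exact hc))]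
    by_cases h2b : cs[p] = '\\'
    · rw [if_pos h2b]
      have hp2 : p + 2 ≤ r := by
        by_contra hcon
        have hpe : p = r - 1 := by omega
        refine hb hplt ?_
        rw [← hpe, ← h2b]; exact hc
      exact ih (p + 2) r (by omega) hp2 hr (fun i hi h => hq i (by omega) h) (fun h => hb (by omega))
    · rw [if_neg h2b]
      exact ih (p + 1) r (by omega) (by omega) hr (fun i hi h => hq i (by omega) h) (fun h => hb (by omega))

-- Over a pure backslash run ending at a quote, A's outcome is decided by the run's parity.
lemma loopA_run {cs : List Char} : ∀ (n r q : Nat), q - r ≤ n → r ≤ q → cs[q]? = some '"' →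
    (∀ i, r ≤ i → i < q → cs[i]? = some '\\') →
    tokenStrLoopA cs r = (if (q - r) % 2 = 0 then some (q + 1) else tokenStrLoopA cs (q + 1)) := by
  intro n
  induction n with
  | zero =>
    intro r q h1 h2 hq _
    have hrq : r = q := by omega
    subst hrq
    rw [loopA_step hq]; simp
  | succ n ih =>
    intro r q h1 h2 hq hrun
    by_cases hrq : r = q
    · subst hrq; rw [loopA_step hq]; simp
    have hlt : r < q := by omega
    have hc : cs[r]? = some '\\' := hrun r le_rfl hlt
    rw [loopA_step hc, if_neg (by decide), if_pos rfl]
    by_cases h1q : r + 1 = q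
    · have hpar : ¬ ((q - r) % 2 = 0) := by omega
      rw [if_neg hpar, (by omega : r + 2 = q + 1)]
    · have hr2 : r + 2 ≤ q := by omega
      rw [ih (r + 2) q (by omega) hr2 hq (fun i hi h => hrun i (by omega) h)]
      have hpe : (q - (r + 2)) % 2 = (q - r) % 2 := by omega
      rw [hpe]

lemma pyGet?_pred {cs : List Char} {b : Nat} (hb : 1 ≤ b) :
    PySem.List.pyGet? cs ((b : Int) - 1) = cs[b - 1]? := by
  have hcast : ((b : Int) - 1) = ((b - 1 : Nat) : Int) := by omega
  rw [hcast, PySem.List.pyGet?_natCast]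

lemma bLoopB_pos {cs : List Char} (h0 : cs[0]? ≠ some '\\') : ∀ (q : Nat), 1 ≤ q → 1 ≤ bLoopB cs q := by
  intro q hq
  rw [bLoopB]
  split_ifs with h
  · rcases h with ⟨hq0, hget⟩
    by_cases h1 : q = 1
    · exfalso
      rw [h1, pyGet?_pred le_rfl] at hget
      exact h0 (by simpa using hget)
    · exact bLoopB_pos h0 (q - 1) (by omega)
  · exact hq
termination_by q => q

-- characterisation of Source B's backslash-counting loop
lemma bLoopB_char {cs : List Char} (h0 : cs[0]? ≠ some '\\') : ∀ (q : Nat),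
    bLoopB cs q ≤ q ∧ (∀ i, bLoopB cs q ≤ i → i < q → cs[i]? = some '\\') ∧
    (1 ≤ bLoopB cs q → cs[bLoopB cs q - 1]? ≠ some '\\') := by
  intro q
  rw [bLoopB]
  split_ifs with h
  · rcases h with ⟨hq, hget⟩
    obtain ⟨ih1, ih2, ih3⟩ := bLoopB_char h0 (q - 1)
    refine ⟨by omega, ?_, ih3⟩
    intro i hi hil
    by_cases hiq : i = q - 1
    · subst hiq; rw [← pyGet?_pred (by omega)]; exact hget
    · exact ih2 i hi (by omega)
  · refine ⟨le_rfl, fun i h1 h2 => absurd h2 (by omega), ?_⟩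
    intro h1 hc
    exact h ⟨by omega, by rw [pyGet?_pred h1]; exact hc⟩
termination_by q => q

-- main equivalence of the two loops, by induction on B's fuel
lemma loops_eq {cs : List Char} (h0 : cs[0]? = some '"') : ∀ (fuel cut : Nat), 1 ≤ cut →
    cs[cut - 1]? = some '"' → cs.length ≤ fuel + cut →
    tokenStrLoopA cs cut = strLoopB cs fuel (cut - 1) := by
  intro fuel
  induction fuel with
  | zero =>
    intro cut h1 hq hlen
    have hcl : cut - 1 < cs.length := (List.getElem?_eq_some_iff.mp hq).1
    rw [strLoopB, loopA_stop (by omega)]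
  | succ fuel ih =>
    intro cut h1 hq hlen
    rw [strLoopB]
    simp only
    have hcast : ((cut - 1 : Nat) : Int) + 1 = ((cut : Nat) : Int) := by omega
    rw [hcast]
    have hcl : cut - 1 < cs.length := (List.getElem?_eq_some_iff.mp hq).1
    have hcutle : cut ≤ cs.length := by omega
    rw [PySem.Chars.findFrom_natCast cs ['"'] cut hcutle]
    by_cases hfind : PySem.Chars.find (cs.drop cut) ['"'] = -1
    · rw [if_pos (by rw [if_pos hfind])]
      apply loopA_noQuote
      intro i hi hc
      rw [PySem.Chars.find_eq_neg_one_iff] at hfind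
      apply hfind
      rw [← PySem.Chars.isIn_iff_infix, ← PySem.Chars.exists_prefix_drop_iff_isIn]
      refine ⟨i - cut, ?_⟩
      rw [← PySem.Chars.startswith_iff, List.drop_drop, (by omega : cut + (i - cut) = i), sw_single_at]
      exact hc
    · have hnn : (0 : Int) ≤ PySem.Chars.find (cs.drop cut) ['"'] := by
        have hge := PySem.Chars.neg_one_le_find (s := cs.drop cut) (sub := ['"'])
        omega
      obtain ⟨hpre, hmin⟩ := PySem.Chars.find_spec hnn
      rw [if_neg (by rw [if_neg hfind]; omega)]
      set j := (PySem.Chars.find (cs.drop cut) ['"']).toNat with hj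
      have hfq : ((if PySem.Chars.find (cs.drop cut) ['"'] = -1 then (-1 : Int)
          else (cut : Int) + PySem.Chars.find (cs.drop cut) ['"'])).toNat = cut + j := by
        rw [if_neg hfind]; omega
      rw [hfq]
      set q' := cut + j with hq'
      rw [List.drop_drop, (by omega : cut + j = q')] at hpre
      have hqget : cs[q']? = some '"' := by
        rw [← sw_single_at, PySem.Chars.startswith_iff]; exact hpre
      have hq'lt : q' < cs.length := (List.getElem?_eq_some_iff.mp hqget).1
      have hnoq : ∀ i, cut ≤ i → i < q' → cs[i]? ≠ some '"' := by
        intro i hi hil hc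
        apply hmin (i - cut) (by omega)
        rw [List.drop_drop, (by omega : cut + (i - cut) = i),
          ← PySem.Chars.startswith_iff, sw_single_at]
        exact hc
      have h0' : cs[0]? ≠ some '\\' := by rw [h0]; simp
      obtain ⟨hble, hrun, hbstop⟩ := bLoopB_char h0' q'
      set b := bLoopB cs q' with hb
      have hb1 : 1 ≤ b := bLoopB_pos h0' q' (by omega)
      have hbcut : cut ≤ b := by
        by_contra hcon
        have hbs : cs[cut - 1]? = some '\\' := hrun (cut - 1) (by omega) (by omega)
        rw [hq] at hbs
        exact absurd (Option.some_inj.mp hbs) (by decide)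
      have hskip : tokenStrLoopA cs cut = tokenStrLoopA cs b :=
        loopA_skip cs.length cut b (by omega) hbcut (by omega)
          (fun i hi hil => hnoq i hi (by omega)) (fun _ => hbstop hb1)
      have hrun' : tokenStrLoopA cs b =
          (if (q' - b) % 2 = 0 then some (q' + 1) else tokenStrLoopA cs (q' + 1)) :=
        loopA_run cs.length b q' (by omega) hble hqget hrun
      rw [hskip, hrun']
      by_cases hpar : (q' - b) % 2 = 0
      · rw [if_pos hpar, if_pos hpar]
      · rw [if_neg hpar, if_neg hpar]
        have hih := ih (q' + 1) (by omega) (by simpa using hqget) (by omega)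
        simpa using hih

-- token_char = token_char_alt, by cases on the first four characters
lemma token_char_eq (text : String) : token_char text = token_char_alt text := by
  unfold token_char token_char_alt
  simp only
  by_cases hsw : PySem.Chars.startswith text.toList ['\''] = true
  · rw [if_pos hsw, if_pos hsw]
    rcases text.toList with _ | ⟨a, _ | ⟨b, _ | ⟨c, _ | ⟨d, rest⟩⟩⟩⟩ <;>
      simp [PySem.List.pyGet?, PySem.List.pyIdx?] <;> split_ifs <;> simp_all <;> omega
  · rw [if_neg hsw, if_neg hsw]

-- ===== VERDICT (by name: the statement is the Claim_ definition above) =====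
theorem token_str_spec : Claim_equal_token_str := by
  intro text _
  unfold Spec_token_str token_str token_str_alt
  simp only
  by_cases hsw : PySem.Chars.startswith text.toList ['"'] = true
  · rw [if_pos hsw, if_pos hsw]
    have h0 : text.toList[0]? = some '"' := sw_single.mp hsw
    rw [loops_eq h0 (text.toList.length + 1) 1 le_rfl (by simpa using h0) (by omega)]
  · rw [if_neg hsw, if_neg hsw]
    exact token_char_eq text
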